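-- pv_equiv track=rewrite | github.com/gireesh2803/AI-Enabled-Music-Player-System | helper.py | convert_duration
-- ===== SOURCE A (Python) =====
-- def convert_duration(duration):
-- 	duration = duration.split(":")
-- 	duration = [int(i) for i in duration]
-- 	if len(duration) == 3:
-- 		return duration[0] * 3600 + duration[1] * 60 + duration[2]
-- 	elif len(duration) == 2:
-- 		return duration[0] * 60 + duration[1]
-- 	elif len(duration) == 1:
-- 		return duration[0]
-- ===== SOURCE B (Python) =====
-- def convert_duration(duration):
--     total = 0
--     for p in [int(i) for i in duration.split(":")]:
--         total = total * 60 + p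
--     return total
-- ===== Notes on version B (the rewrite author's own statement) =====
-- stated objective: simpler
-- what changed: Replaces the three closed-form length branches by a single Horner-style base-60 fold over the parsed parts.
-- outside the precondition, e.g. on convert_duration('1:2:3:4'): A returns None, B returns 223384
import Mathlib
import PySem

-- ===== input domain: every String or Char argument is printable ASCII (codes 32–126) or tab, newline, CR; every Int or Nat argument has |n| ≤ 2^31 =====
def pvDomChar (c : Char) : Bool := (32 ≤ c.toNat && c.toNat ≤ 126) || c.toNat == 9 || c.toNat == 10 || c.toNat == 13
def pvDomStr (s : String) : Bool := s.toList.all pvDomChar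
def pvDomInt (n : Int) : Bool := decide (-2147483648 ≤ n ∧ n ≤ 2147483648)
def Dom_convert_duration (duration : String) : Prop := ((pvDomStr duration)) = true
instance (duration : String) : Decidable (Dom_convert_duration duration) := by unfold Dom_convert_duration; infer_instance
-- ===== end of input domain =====

-- B replaces A's three length branches with one Horner base-60 fold (objective: simpler).

-- ===== PORT A =====
def convert_duration (duration : String) : Int :=
  let parts := ((PySem.Str.split? duration ":").getD [])
  -- int(i) for each part; ValueError (parse failure) is excluded by Pre_, getD 0 is unreachable there
  let ints := parts.map (fun s => (PySem.Int.ofStr? s).getD 0)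
  if ints.length = 3 then ints.getD 0 0 * 3600 + ints.getD 1 0 * 60 + ints.getD 2 0
  else if ints.length = 2 then ints.getD 0 0 * 60 + ints.getD 1 0
  else if ints.length = 1 then ints.getD 0 0
  else 0  -- Python returns None here; excluded by Pre_

-- ===== PORT B =====
def convert_duration_alt (duration : String) : Int :=
  let ints := (((PySem.Str.split? duration ":").getD [])).map (fun s => (PySem.Int.ofStr? s).getD 0)
  ints.foldl (fun t p => t * 60 + p) 0

-- ===== PRECONDITION & SPEC =====
-- Pre_ excludes inputs where A raises ValueError (a part int() cannot parse) and inputs with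
-- four or more colon-separated parts, where A falls through all branches and returns None (no Int).
def Pre_convert_duration (duration : String) : Prop :=
  (((PySem.Str.split? duration ":").getD [])).length ≤ 3 ∧
  ∀ p ∈ ((PySem.Str.split? duration ":").getD []), (PySem.Int.ofStr? p).isSome
instance (duration : String) : Decidable (Pre_convert_duration duration) := by
  unfold Pre_convert_duration; infer_instance
def pvWitness_convert_duration : String := "1:02:3"
def Spec_convert_duration (duration : String) (out : Int) : Prop := out = convert_duration_alt duration
instance (duration : String) (out : Int) : Decidable (Spec_convert_duration duration out) := by unfold Spec_convert_duration; infer_instance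

-- ===== CLAIM (what is proved, stated in full; the proofs are below) =====
def Claim_equal_convert_duration : Prop := ∀ (duration : String), Dom_convert_duration duration → Pre_convert_duration duration → Spec_convert_duration duration (convert_duration duration)

-- ===== LEMMAS AND PROOFS =====
lemma horner_branches (l : List Int) (h : l.length ≤ 3) :
    (if l.length = 3 then l.getD 0 0 * 3600 + l.getD 1 0 * 60 + l.getD 2 0
     else if l.length = 2 then l.getD 0 0 * 60 + l.getD 1 0
     else if l.length = 1 then l.getD 0 0
     else 0) = l.foldl (fun t p => t * 60 + p) 0 := by
  match l with
  | [] => simp [List.foldl]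
  | [a] => simp [List.foldl]
  | [a, b] => simp only [List.foldl]; norm_num
  | [a, b, c] => simp only [List.foldl]; norm_num; ring
  | _ :: _ :: _ :: _ :: _ => simp at h; omega

-- ===== VERDICT (by name: the statement is the Claim_ definition above) =====
theorem convert_duration_spec : Claim_equal_convert_duration := by
  intro duration _ hpre
  unfold Spec_convert_duration convert_duration convert_duration_alt
  have := horner_branches ((((PySem.Str.split? duration ":").getD [])).map (fun s => (PySem.Int.ofStr? s).getD 0))
    (by simpa using hpre.1)
  simpa using this
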